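-- pv_equiv track=rewrite | github.com/Boberkraft/Data-Structures-and-Algorithms-in-Python | chapter1/C-1.14.py | is_dinstinc
-- ===== SOURCE A (Python) =====
-- def is_dinstinc(seq, many=5):
--     cou = 0
--     for num in seq:
--         if num % 2 == 1:
--             cou += 1
--             if cou >= many:
--                 return True
--         else:
--             cou = 0
--     return False
-- ===== SOURCE B (Python) =====
-- def is_dinstinc(seq, many=5):
--     def leading_odds(xs):
--         k = 0
--         for x in xs:
--             if x % 2 == 1:
--                 k += 1
--             else:
--                 break
--         return k
--
--     rest = seq
--     while rest:
--         if rest[0] % 2 == 1: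
--             k = leading_odds(rest)
--             if k >= many:
--                 return True
--             rest = rest[k:]
--         else:
--             rest = rest[1:]
--     return False
-- ===== Notes on version B (the rewrite author's own statement) =====
-- stated objective: alternative
-- what changed: Replaces A's running-counter/reset state machine with an explicit run decomposition: B repeatedly measures the length of the maximal leading odd run and tests it against `many`, advancing past whole runs.
import Mathlib
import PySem

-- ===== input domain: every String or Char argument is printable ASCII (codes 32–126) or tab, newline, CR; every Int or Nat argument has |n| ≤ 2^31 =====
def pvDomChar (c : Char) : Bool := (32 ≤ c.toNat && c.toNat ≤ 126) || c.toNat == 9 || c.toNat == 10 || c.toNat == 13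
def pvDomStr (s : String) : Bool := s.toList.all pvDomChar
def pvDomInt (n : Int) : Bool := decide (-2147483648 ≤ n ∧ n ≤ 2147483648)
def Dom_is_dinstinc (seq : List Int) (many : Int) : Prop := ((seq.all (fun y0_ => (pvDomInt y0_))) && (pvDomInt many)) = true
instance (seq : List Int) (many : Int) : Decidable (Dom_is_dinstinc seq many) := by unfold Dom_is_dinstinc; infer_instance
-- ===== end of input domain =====

-- B replaces A's running-counter/reset state machine by scanning maximal leading
-- odd runs and testing each run length against `many` (alternative decomposition).

-- ===== PORT A =====
-- the `for num in seq` loop with counter `cou` and early `return True`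
def isdLoopA (many : Int) : List Int → Int → Bool
  | [], _ => false
  | num :: rest, cou =>
    if PySem.Int.mod num 2 = 1 then
      -- cou += 1; if cou >= many: return True
      if many ≤ cou + 1 then true else isdLoopA many rest (cou + 1)
    else
      isdLoopA many rest 0

def is_dinstinc (seq : List Int) (many : Int) : Bool := isdLoopA many seq 0

-- mod-by-2 bridge; cited by isdOuter's termination proof
theorem pymod2 (x : Int) : PySem.Int.mod x 2 = x % 2 :=
  PySem.Int.mod_eq_emod_of_pos (by norm_num)

-- ===== PORT B =====
-- leading_odds: count of leading odd elements (the inner for/break loop)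
def isdRun : List Int → Nat
  | [] => 0
  | x :: xs => if PySem.Int.mod x 2 = 1 then isdRun xs + 1 else 0

-- the `while rest` loop: advance past a whole odd run (rest = rest[k:]) or one even element
def isdOuter (many : Int) : List Int → Bool
  | [] => false
  | x :: xs =>
    if hx : PySem.Int.mod x 2 = 1 then
      let k := isdRun (x :: xs)
      if many ≤ (k : Int) then true else isdOuter many ((x :: xs).drop k)
    else
      isdOuter many xs
termination_by l => l.length
decreasing_by
  · have hx2 : x % 2 = 1 := (pymod2 x).symm.trans hx
    have hk : isdRun (x :: xs) = isdRun xs + 1 := by simp [isdRun, pymod2, hx2]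
    simp only [hk, List.length_drop, List.length_cons]
    omega
  · simp only [List.length_cons]
    omega

def is_dinstinc_alt (seq : List Int) (many : Int) : Bool := isdOuter many seq

-- ===== PRECONDITION & SPEC =====
def Spec_is_dinstinc (seq : List Int) (many : Int) (out : Bool) : Prop := out = is_dinstinc_alt seq many
instance (seq : List Int) (many : Int) (out : Bool) : Decidable (Spec_is_dinstinc seq many out) := by unfold Spec_is_dinstinc; infer_instance

-- ===== CLAIM (what is proved, stated in full; the proofs are below) =====
def Claim_equal_is_dinstinc : Prop := ∀ (seq : List Int) (many : Int), Dom_is_dinstinc seq many → Spec_is_dinstinc seq many (is_dinstinc seq many)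

-- ===== LEMMAS AND PROOFS =====

-- If the leading odd run (from counter state cou) reaches the threshold, A returns true.
theorem isdLoopA_true (many : Int) : ∀ (L : List Int) (cou : Int),
    1 ≤ isdRun L → many ≤ cou + isdRun L → isdLoopA many L cou = true := by
  intro L
  induction L with
  | nil => intro cou h1 _; simp [isdRun] at h1
  | cons x xs ih =>
    intro cou h1 h2
    by_cases hx : x % 2 = 1
    · have hrun : isdRun (x :: xs) = isdRun xs + 1 := by simp [isdRun, pymod2, hx]
      rw [hrun] at h2
      simp only [isdLoopA, pymod2, hx, if_pos]
      by_cases ht : many ≤ cou + 1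
      · simp [ht]
      · have hr : 1 ≤ isdRun xs := by
          rcases Nat.eq_zero_or_pos (isdRun xs) with h0 | h0
          · rw [h0] at h2; push_cast at h2; omega
          · exact h0
        rw [if_neg ht]
        exact ih (cou + 1) hr (by push_cast at h2 ⊢; omega)
    · have : isdRun (x :: xs) = 0 := by simp [isdRun, pymod2, hx]
      omega
-- If the leading odd run does not reach it, A's loop skips past the run keeping the counter.
theorem isdLoopA_skip (many : Int) : ∀ (L : List Int) (cou : Int),
    ¬ (1 ≤ isdRun L ∧ many ≤ cou + isdRun L) →
    isdLoopA many L cou = isdLoopA many (L.drop (isdRun L)) (cou + isdRun L) := by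
  intro L
  induction L with
  | nil => intro cou _; simp [isdRun, isdLoopA]
  | cons x xs ih =>
    intro cou h
    by_cases hx : x % 2 = 1
    · have hrun : isdRun (x :: xs) = isdRun xs + 1 := by simp [isdRun, pymod2, hx]
      rw [hrun] at h ⊢
      have ht : ¬ many ≤ cou + 1 := fun hc => h ⟨by omega, by push_cast; omega⟩
      have h' : ¬ (1 ≤ isdRun xs ∧ many ≤ (cou + 1) + isdRun xs) := by
        rintro ⟨h1, h2⟩
        exact h ⟨by omega, by push_cast at h2 ⊢; omega⟩
      simp only [isdLoopA, pymod2, hx, if_pos, ht, if_neg, List.drop_succ_cons]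
      rw [ih (cou + 1) h']
      congr 1
      push_cast
      ring
    · have hrun : isdRun (x :: xs) = 0 := by simp [isdRun, pymod2, hx]
      rw [hrun]
      simp [isdLoopA, pymod2, hx]

-- After dropping the maximal leading odd run, the next element (if any) is even.
theorem drop_run_head_even : ∀ (L : List Int) (y : Int) (ys : List Int),
    L.drop (isdRun L) = y :: ys → y % 2 ≠ 1 := by
  intro L
  induction L with
  | nil => intro y ys h; simp at h
  | cons x xs ih =>
    intro y ys h
    by_cases hx : x % 2 = 1
    · have hrun : isdRun (x :: xs) = isdRun xs + 1 := by simp [isdRun, pymod2, hx]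
      rw [hrun, List.drop_succ_cons] at h
      exact ih y ys h
    · have hrun : isdRun (x :: xs) = 0 := by simp [isdRun, pymod2, hx]
      rw [hrun, List.drop_zero] at h
      cases h
      exact hx

theorem outer_eq_loopA (many : Int) : ∀ (n : Nat) (L : List Int), L.length ≤ n →
    isdOuter many L = isdLoopA many L 0 := by
  intro n
  induction n with
  | zero =>
    intro L hL
    have hnil : L = [] := by cases L <;> simp_all
    subst hnil
    simp [isdOuter, isdLoopA]
  | succ n ih =>
    intro L hL
    cases L with
    | nil => simp [isdOuter, isdLoopA]
    | cons x xs =>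
      by_cases hx : x % 2 = 1
      · have hrun : isdRun (x :: xs) = isdRun xs + 1 := by simp [isdRun, pymod2, hx]
        have hr : 1 ≤ isdRun (x :: xs) := by omega
        by_cases ht : many ≤ (isdRun (x :: xs) : Int)
        · rw [isdLoopA_true many (x :: xs) 0 hr (by omega)]
          simp [isdOuter, pymod2, hx, ht]
        · have hskip := isdLoopA_skip many (x :: xs) 0 (by rintro ⟨_, h2⟩; exact ht (by omega))
          rw [zero_add] at hskip
          rw [hskip]
          simp only [isdOuter, pymod2, hx, dif_pos, ht, if_neg, not_false_iff]
          rcases hD : (x :: xs).drop (isdRun (x :: xs)) with _ | ⟨y, ys⟩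
          · simp [isdLoopA, isdOuter]
          · have hy : y % 2 ≠ 1 := drop_run_head_even (x :: xs) y ys hD
            simp only [isdLoopA, pymod2, hy, if_neg, not_false_iff, isdOuter]
            have hlen : ys.length ≤ n := by
              have hc := congrArg List.length hD
              simp only [List.length_drop, List.length_cons] at hc hL
              omega
            exact ih ys hlen
      · have hxm : ¬ PySem.Int.mod x 2 = 1 := by rw [pymod2]; exact hx
        simp only [isdOuter, hxm, dif_neg, not_false_iff, isdLoopA, if_neg]
        apply ih
        simp only [List.length_cons] at hL
        omega

-- ===== VERDICT (by name: the statement is the Claim_ definition above) =====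
theorem is_dinstinc_spec : Claim_equal_is_dinstinc := by
  intro seq many _
  unfold Spec_is_dinstinc is_dinstinc is_dinstinc_alt
  exact (outer_eq_loopA many seq.length seq le_rfl).symm
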